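-- pv_equiv track=rewrite | github.com/jw9603/Python | 삼성간다/step2/14890.py | cnt_pass
-- ===== SOURCE A (Python) =====
-- def can_pass(line, L):
--     N = len(line)
--     visited = [False] * N
--
--     for i in range(N - 1):
--         if line[i] == line[i + 1]:
--             continue
--
--         elif line[i] + 1 == line[i + 1]:
--             for j in range(i, i - L, -1):
--                 if j < 0 or line[j] != line[i] or visited[j]:
--                     return False
--                 visited[j] = True
--
--         elif line[i] - 1 == line[i + 1]:
--             for j in range(i + 1, i + 1 + L):
--                 if j >= N or line[j] != line[i + 1] or visited[j]:
--                     return False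
--                 visited[j] = True
--         else:
--             return False
--     return True
--
-- def cnt_pass(grid, L):
--     cnt = 0
--
--     for row in grid:
--         if can_pass(row, L):
--             cnt += 1
--
--     for col in zip(*grid):
--         if can_pass(col, L):
--             cnt += 1
--
--     return cnt
-- ===== SOURCE B (Python) =====
-- def can_pass(line, L):
--     # Single left-to-right pass: cnt = length of the run of equal, still-usable
--     # cells ending at i; a down-ramp consumes its L cells by jumping i ahead.
--     n = len(line)
--     i = 0
--     cnt = 1
--     while i < n - 1:
--         d = line[i + 1] - line[i]
--         if d == 0:
--             cnt += 1
--             i += 1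
--         elif d == 1:
--             if cnt < L:
--                 return False
--             cnt = 1
--             i += 1
--         elif d == -1:
--             if i + L >= n:
--                 return False
--             if any(line[k] != line[i + 1] for k in range(i + 2, i + L + 1)):
--                 return False
--             cnt = 0
--             i += max(1, L)
--         else:
--             return False
--     return True
--
-- def cnt_pass(grid, L):
--     rows = sum(1 for row in grid if can_pass(row, L))
--     cols = sum(1 for col in zip(*grid) if can_pass(col, L))
--     return rows + cols
-- ===== Notes on version B (the rewrite author's own statement) =====
-- stated objective: simpler
-- what changed: can_pass is rewritten as a single left-to-right pass keeping a run-length counter of usable equal cells and jumping over the L cells a down-ramp consumes, instead of allocating and marking a visited[] array; cnt_pass counts with sum() over generators instead of an accumulator loop.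
import Mathlib
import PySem

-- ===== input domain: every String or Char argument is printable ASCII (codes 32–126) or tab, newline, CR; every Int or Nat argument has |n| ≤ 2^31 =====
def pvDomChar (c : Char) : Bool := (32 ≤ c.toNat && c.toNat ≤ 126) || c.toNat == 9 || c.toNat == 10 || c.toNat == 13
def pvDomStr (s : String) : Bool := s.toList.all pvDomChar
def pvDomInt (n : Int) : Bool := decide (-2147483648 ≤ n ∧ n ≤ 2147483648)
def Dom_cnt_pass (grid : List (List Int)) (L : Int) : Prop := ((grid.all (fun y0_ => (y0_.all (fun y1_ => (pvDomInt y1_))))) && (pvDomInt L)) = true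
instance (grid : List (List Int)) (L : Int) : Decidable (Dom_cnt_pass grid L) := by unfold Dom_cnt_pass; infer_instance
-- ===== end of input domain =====

-- B replaces A's visited[]-marking can_pass by a single pass with a run counter and a jump over
-- cells consumed by a down-ramp (objective: simpler; same asymptotic cost).

-- ===== PORT A =====
-- zip(*grid): Python's zip over the rows, column tuples as lists; shared by both ports
-- (hand port of the built-in; exact: stops at the shortest row, zip() of no rows is empty).
def pyZipStar (grid : List (List Int)) : List (List Int) :=
  match grid with
  | [] => []
  | r :: rs =>
    (List.range ((r :: rs).foldl (fun m t => min m t.length) r.length)).map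
      (fun j => (r :: rs).map (fun t => t.getD j 0))

-- inner 'for j in range(i, i-L, -1)' of can_pass: returns none on 'return False',
-- else the updated visited list (indices are in range at every access, so pyGetD/pySetD are exact)
def upLoop (line : List Int) (a : Int) (js : List Int) (visited : List Bool) : Option (List Bool) :=
  match js with
  | [] => some visited
  | j :: rest =>
    if j < 0 ∨ PySem.List.pyGetD line j 0 ≠ a ∨ PySem.List.pyGetD visited j false = true then none
    else upLoop line a rest (PySem.List.pySetD visited j true)

-- inner 'for j in range(i+1, i+1+L)' of can_pass
def downLoop (line : List Int) (N b : Int) (js : List Int) (visited : List Bool) : Option (List Bool) :=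
  match js with
  | [] => some visited
  | j :: rest =>
    if N ≤ j ∨ PySem.List.pyGetD line j 0 ≠ b ∨ PySem.List.pyGetD visited j false = true then none
    else downLoop line N b rest (PySem.List.pySetD visited j true)

-- outer 'for i in range(N-1)' of can_pass
def canGo (line : List Int) (L N : Int) (is : List Int) (visited : List Bool) : Bool :=
  match is with
  | [] => true
  | i :: rest =>
    if PySem.List.pyGetD line i 0 = PySem.List.pyGetD line (i+1) 0 then
      canGo line L N rest visited
    else if PySem.List.pyGetD line i 0 + 1 = PySem.List.pyGetD line (i+1) 0 then
      match upLoop line (PySem.List.pyGetD line i 0) (PySem.List.pyRange i (i - L) (-1)) visited with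
      | none => false
      | some v => canGo line L N rest v
    else if PySem.List.pyGetD line i 0 - 1 = PySem.List.pyGetD line (i+1) 0 then
      match downLoop line N (PySem.List.pyGetD line (i+1) 0) (PySem.List.pyRange (i+1) (i+1+L) 1) visited with
      | none => false
      | some v => canGo line L N rest v
    else false

def can_pass_A (line : List Int) (L : Int) : Bool :=
  canGo line L (line.length : Int) (PySem.List.pyRange 0 ((line.length : Int) - 1) 1)
    (List.replicate line.length false)

def cnt_pass (grid : List (List Int)) (L : Int) : Int :=
  let c1 := grid.foldl (fun c row => if can_pass_A row L then c + 1 else c) (0 : Int)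
  (pyZipStar grid).foldl (fun c col => if can_pass_A col L then c + 1 else c) c1

-- ===== PORT B =====
-- while-loop of B's can_pass: i the position, cnt the usable run length ending at i
-- the while loop, totalized with fuel: i advances by at least 1 each iteration, so
-- fuel = len(line) (more than the residual iteration count) never runs out
def altGo (line : List Int) (L : Int) (fuel : Nat) (i cnt : Int) : Bool :=
  match fuel with
  | 0 => true
  | fuel + 1 =>
    if i < (line.length : Int) - 1 then
      if PySem.List.pyGetD line (i+1) 0 - PySem.List.pyGetD line i 0 = 0 then
        altGo line L fuel (i+1) (cnt+1)
      else if PySem.List.pyGetD line (i+1) 0 - PySem.List.pyGetD line i 0 = 1 then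
        if cnt < L then false else altGo line L fuel (i+1) 1
      else if PySem.List.pyGetD line (i+1) 0 - PySem.List.pyGetD line i 0 = -1 then
        if (line.length : Int) ≤ i + L then false
        else if (PySem.List.pyRange (i+2) (i+L+1) 1).any
            (fun k => PySem.List.pyGetD line k 0 ≠ PySem.List.pyGetD line (i+1) 0) then false
        else altGo line L fuel (i + max 1 L) 0
      else false
    else true

def can_pass_B (line : List Int) (L : Int) : Bool := altGo line L line.length 0 1

def cnt_pass_alt (grid : List (List Int)) (L : Int) : Int :=
  ((grid.countP (fun r => can_pass_B r L) : Int))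
    + ((pyZipStar grid).countP (fun r => can_pass_B r L) : Int)

-- ===== PRECONDITION & SPEC =====
def Spec_cnt_pass (grid : List (List Int)) (L : Int) (out : Int) : Prop := out = cnt_pass_alt grid L
instance (grid : List (List Int)) (L : Int) (out : Int) : Decidable (Spec_cnt_pass grid L out) := by unfold Spec_cnt_pass; infer_instance

-- ===== CLAIM (what is proved, stated in full; the proofs are below) =====
def Claim_equal_cnt_pass : Prop := ∀ (grid : List (List Int)) (L : Int), Dom_cnt_pass grid L → Spec_cnt_pass grid L (cnt_pass grid L)

-- ===== LEMMAS AND PROOFS =====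

-- reading an index other than the one just written
lemma pvGetD_set_ne (xs : List Bool) (i j : Int) (v d : Bool) (hi : 0 ≤ i) (hj : 0 ≤ j)
    (hne : i ≠ j) :
    PySem.List.pyGetD (PySem.List.pySetD xs i v) j d = PySem.List.pyGetD xs j d := by
  rw [PySem.List.pySetD_of_nonneg xs v hi]
  have hji : j = ((j.toNat : Nat) : Int) := (Int.toNat_of_nonneg hj).symm
  rw [hji, PySem.List.pyGetD_natCast, PySem.List.pyGetD_natCast]
  simp [List.getD]
  rw [List.getElem?_set_ne]
  omega

lemma pvGetD_set_self (xs : List Bool) (i : Int) (v d : Bool) (hi : 0 ≤ i)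
    (hlen : i < (xs.length : Int)) :
    PySem.List.pyGetD (PySem.List.pySetD xs i v) i d = v := by
  rw [PySem.List.pySetD_of_nonneg xs v hi]
  have hji : i = ((i.toNat : Nat) : Int) := (Int.toNat_of_nonneg hi).symm
  rw [hji, PySem.List.pyGetD_natCast]
  simp [List.getD]
  have hm : (max i 0).toNat = i.toNat := by omega
  rw [hm, List.getElem?_set_self (by simpa using by omega : i.toNat < xs.length)]
  simp

-- the visited list after a marking loop ran through all of js
def pvMark (visited : List Bool) : List Int → List Bool
  | [] => visited
  | j :: rest => pvMark (PySem.List.pySetD visited j true) rest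

lemma pvMark_length (js : List Int) (visited : List Bool) :
    (pvMark visited js).length = visited.length := by
  induction js generalizing visited with
  | nil => rfl
  | cons j rest ih => simp [pvMark, ih, PySem.List.length_pySetD]

lemma pvGetD_mark (js : List Int) (visited : List Bool) (j : Int)
    (hjs : ∀ x ∈ js, 0 ≤ x ∧ x < (visited.length : Int)) (hj : 0 ≤ j) :
    PySem.List.pyGetD (pvMark visited js) j false =
      (if j ∈ js then true else PySem.List.pyGetD visited j false) := by
  induction js generalizing visited with
  | nil => simp [pvMark]
  | cons j0 rest ih =>
    obtain ⟨hj0, hj0len⟩ := hjs j0 (by simp)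
    have hlen' : (PySem.List.pySetD visited j0 true).length = visited.length :=
      PySem.List.length_pySetD _ _ _
    have hrest : ∀ x ∈ rest, 0 ≤ x ∧ x < ((PySem.List.pySetD visited j0 true).length : Int) := by
      intro x hx; rw [hlen']; exact hjs x (by simp [hx])
    rw [pvMark, ih _ hrest]
    by_cases hjj : j = j0
    · subst hjj
      by_cases hmem : j ∈ rest
      · simp [hmem]
      · simp [hmem, pvGetD_set_self visited j true false hj0 hj0len]
    · rw [pvGetD_set_ne visited j0 j true false hj0 hj (fun h => hjj h.symm)]
      by_cases hmem : j ∈ rest <;> simp [hmem, hjj]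

lemma pvUpLoop_ok (line : List Int) (a : Int) (js : List Int) (visited : List Bool)
    (hjs : ∀ j ∈ js, 0 ≤ j ∧ j < (visited.length : Int) ∧
      PySem.List.pyGetD line j 0 = a ∧ PySem.List.pyGetD visited j false = false)
    (hnd : js.Nodup) :
    upLoop line a js visited = some (pvMark visited js) := by
  induction js generalizing visited with
  | nil => rfl
  | cons j rest ih =>
    obtain ⟨hj0, hjlen, hline, hvis⟩ := hjs j (by simp)
    obtain ⟨hjni, hnd'⟩ := List.nodup_cons.mp hnd
    rw [upLoop, if_neg (by push Not; exact ⟨by omega, by simpa using hline, by simp [hvis]⟩)]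
    have hrest : ∀ x ∈ rest, 0 ≤ x ∧ x < ((PySem.List.pySetD visited j true).length : Int) ∧
        PySem.List.pyGetD line x 0 = a ∧
        PySem.List.pyGetD (PySem.List.pySetD visited j true) x false = false := by
      intro x hx
      obtain ⟨h1, h2, h3, h4⟩ := hjs x (by simp [hx])
      refine ⟨h1, by rwa [PySem.List.length_pySetD], h3, ?_⟩
      rw [pvGetD_set_ne visited j x true false hj0 h1 (fun h => hjni (h ▸ hx))]
      exact h4
    rw [ih _ hrest hnd']
    rfl

lemma pvUpLoop_fail (line : List Int) (a : Int) (js : List Int) (visited : List Bool)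
    (hbad : ∃ j ∈ js, j < 0 ∨ PySem.List.pyGetD line j 0 ≠ a ∨
      PySem.List.pyGetD visited j false = true) :
    upLoop line a js visited = none := by
  induction js generalizing visited with
  | nil => simp at hbad
  | cons j0 rest ih =>
    obtain ⟨j, hjmem, hjbad⟩ := hbad
    rw [upLoop]
    by_cases hc : j0 < 0 ∨ PySem.List.pyGetD line j0 0 ≠ a ∨
        PySem.List.pyGetD visited j0 false = true
    · rw [if_pos hc]
    · rw [if_neg hc]
      push Not at hc
      obtain ⟨hc1, hc2, hc3⟩ := hc
      have hne : j ≠ j0 := by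
        intro h; subst h
        rcases hjbad with b | b | b
        · omega
        · exact b hc2
        · exact hc3 b
      have hjrest : j ∈ rest := by
        rcases List.mem_cons.mp hjmem with h | h
        · exact absurd h hne
        · exact h
      apply ih
      refine ⟨j, hjrest, ?_⟩
      by_cases hjneg : j < 0
      · exact Or.inl hjneg
      rcases hjbad with b | b | b
      · exact Or.inl b
      · exact Or.inr (Or.inl b)
      · refine Or.inr (Or.inr ?_)
        rw [pvGetD_set_ne visited j0 j true false (by omega) (by omega) (fun h => hne h.symm)]
        exact b

lemma pvDownLoop_ok (line : List Int) (N b : Int) (js : List Int) (visited : List Bool)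
    (hjs : ∀ j ∈ js, 0 ≤ j ∧ j < N ∧ j < (visited.length : Int) ∧
      PySem.List.pyGetD line j 0 = b ∧ PySem.List.pyGetD visited j false = false)
    (hnd : js.Nodup) :
    downLoop line N b js visited = some (pvMark visited js) := by
  induction js generalizing visited with
  | nil => rfl
  | cons j rest ih =>
    obtain ⟨hj0, hjN, hjlen, hline, hvis⟩ := hjs j (by simp)
    obtain ⟨hjni, hnd'⟩ := List.nodup_cons.mp hnd
    rw [downLoop, if_neg (by push Not; exact ⟨by omega, by simpa using hline, by simp [hvis]⟩)]
    have hrest : ∀ x ∈ rest, 0 ≤ x ∧ x < N ∧ x < ((PySem.List.pySetD visited j true).length : Int) ∧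
        PySem.List.pyGetD line x 0 = b ∧
        PySem.List.pyGetD (PySem.List.pySetD visited j true) x false = false := by
      intro x hx
      obtain ⟨h1, h2, h3, h4, h5⟩ := hjs x (by simp [hx])
      refine ⟨h1, h2, by rwa [PySem.List.length_pySetD], h4, ?_⟩
      rw [pvGetD_set_ne visited j x true false hj0 h1 (fun h => hjni (h ▸ hx))]
      exact h5
    rw [ih _ hrest hnd']
    rfl

lemma pvDownLoop_fail (line : List Int) (N b : Int) (js : List Int) (visited : List Bool)
    (hbad : ∃ j ∈ js, N ≤ j ∨ PySem.List.pyGetD line j 0 ≠ b ∨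
      PySem.List.pyGetD visited j false = true) (hpos : ∀ j ∈ js, 0 ≤ j) :
    downLoop line N b js visited = none := by
  induction js generalizing visited with
  | nil => simp at hbad
  | cons j0 rest ih =>
    obtain ⟨j, hjmem, hjbad⟩ := hbad
    rw [downLoop]
    by_cases hc : N ≤ j0 ∨ PySem.List.pyGetD line j0 0 ≠ b ∨
        PySem.List.pyGetD visited j0 false = true
    · rw [if_pos hc]
    · rw [if_neg hc]
      push Not at hc
      obtain ⟨hc1, hc2, hc3⟩ := hc
      have hne : j ≠ j0 := by
        intro h; subst h
        rcases hjbad with b | b | b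
        · omega
        · exact b hc2
        · exact hc3 b
      have hjrest : j ∈ rest := by
        rcases List.mem_cons.mp hjmem with h | h
        · exact absurd h hne
        · exact h
      refine ih _ ⟨j, hjrest, ?_⟩ (fun x hx => hpos x (by simp [hx]))
      rcases hjbad with b | b | b
      · exact Or.inl b
      · exact Or.inr (Or.inl b)
      · refine Or.inr (Or.inr ?_)
        rw [pvGetD_set_ne visited j0 j true false (hpos j0 (by simp)) (hpos j (by simp [hjrest]))
          (fun h => hne h.symm)]
        exact b

-- outer-loop indices whose adjacent cells are equal are skipped without touching visited
lemma pvSkip_eq (line : List Int) (L N : Int) (js rest : List Int) (visited : List Bool)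
    (heq : ∀ j ∈ js, PySem.List.pyGetD line j 0 = PySem.List.pyGetD line (j+1) 0) :
    canGo line L N (js ++ rest) visited = canGo line L N rest visited := by
  induction js with
  | nil => rfl
  | cons j tl ih =>
    rw [List.cons_append, canGo, if_pos (heq j (by simp))]
    exact ih (fun x hx => heq x (by simp [hx]))

lemma pvGetD_replicate (n : Nat) (j : Int) (hj : 0 ≤ j) :
    PySem.List.pyGetD (List.replicate n false) j false = false := by
  have hji : j = ((j.toNat : Nat) : Int) := (Int.toNat_of_nonneg hj).symm
  rw [hji, PySem.List.pyGetD_natCast]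
  simp [List.getD]

-- the simulation invariant: cnt counts the unused equal cells ending at i,
-- everything to the right of i is unvisited, and the cell left of the run is dead
def PvInv (line : List Int) (L i cnt : Int) (visited : List Bool) : Prop :=
  visited.length = line.length ∧ 0 ≤ i ∧ i < (line.length : Int) ∧ 0 ≤ cnt ∧ cnt ≤ i + 1 ∧
  (∀ j : Int, i < j → PySem.List.pyGetD visited j false = false) ∧
  (∀ j : Int, i - cnt < j → j ≤ i →
    PySem.List.pyGetD line j 0 = PySem.List.pyGetD line i 0 ∧
    PySem.List.pyGetD visited j false = false) ∧
  (0 < L → 0 ≤ i - cnt →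
    PySem.List.pyGetD line (i - cnt) 0 = PySem.List.pyGetD line i 0 →
    PySem.List.pyGetD visited (i - cnt) false = true)

lemma pvMain (line : List Int) (L : Int) : ∀ (K : Nat) (i cnt : Int) (visited : List Bool),
    (((line.length : Int) - 1 - i).toNat ≤ K) → PvInv line L i cnt visited →
    canGo line L (line.length : Int) (PySem.List.pyRange i ((line.length : Int) - 1) 1) visited
      = altGo line L K i cnt := by
  intro K
  induction K with
  | zero =>
    intro i cnt visited hK hinv
    obtain ⟨hlen, hi0, hiN, hc0, hci, hright, hrun, hdead⟩ := hinv
    rw [PySem.List.pyRange_one_eq_nil (by omega)]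
    simp only [canGo, altGo]
  | succ K ih =>
    intro i cnt visited hK hinv
    obtain ⟨hlen, hi0, hiN, hc0, hci, hright, hrun, hdead⟩ := hinv
    by_cases hend : (line.length : Int) - 1 ≤ i
    · rw [PySem.List.pyRange_one_eq_nil hend]
      simp only [canGo, altGo]
      rw [if_neg (show ¬(i < (line.length : Int) - 1) by omega)]
    · push Not at hend
      rw [PySem.List.pyRange_one_cons (show i < (line.length : Int) - 1 from hend)]
      simp only [canGo, altGo]
      rw [if_pos hend]
      by_cases hab : PySem.List.pyGetD line i 0 = PySem.List.pyGetD line (i+1) 0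
      · rw [if_pos hab,
          if_pos (show PySem.List.pyGetD line (i+1) 0 - PySem.List.pyGetD line i 0 = 0 by omega)]
        refine ih (i+1) (cnt+1) visited (by omega)
          ⟨hlen, by omega, by omega, by omega, by omega, ?_, ?_, ?_⟩
        · intro j hj; exact hright j (by omega)
        · intro j h1 h2
          by_cases hji : j = i + 1
          · subst hji; exact ⟨rfl, hright _ (by omega)⟩
          · obtain ⟨hg, hv⟩ := hrun j (by omega) (by omega)
            exact ⟨by rw [hg, hab], hv⟩
        · intro hL h0 hEq
          have hx : i + 1 - (cnt + 1) = i - cnt := by ring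
          rw [hx] at h0 hEq ⊢
          exact hdead hL h0 (by rw [hEq, hab])
      · rw [if_neg hab]
        by_cases hup : PySem.List.pyGetD line i 0 + 1 = PySem.List.pyGetD line (i+1) 0
        · rw [if_pos hup,
            if_neg (show ¬(PySem.List.pyGetD line (i+1) 0 - PySem.List.pyGetD line i 0 = 0) by omega),
            if_pos (show PySem.List.pyGetD line (i+1) 0 - PySem.List.pyGetD line i 0 = 1 by omega)]
          by_cases hcnt : cnt < L
          · rw [if_pos hcnt]
            have hbadw : i - cnt ∈ PySem.List.pyRange i (i - L) (-1) := by
              rw [PySem.List.mem_pyRange_neg_one]; omega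
            have hbad : i - cnt < 0 ∨
                PySem.List.pyGetD line (i - cnt) 0 ≠ PySem.List.pyGetD line i 0 ∨
                PySem.List.pyGetD visited (i - cnt) false = true := by
              by_cases hneg : i - cnt < 0
              · exact Or.inl hneg
              · by_cases hGeq : PySem.List.pyGetD line (i - cnt) 0 = PySem.List.pyGetD line i 0
                · exact Or.inr (Or.inr (hdead (by omega) (by omega) hGeq))
                · exact Or.inr (Or.inl hGeq)
            rw [pvUpLoop_fail line _ _ visited ⟨i - cnt, hbadw, hbad⟩]
          · rw [if_neg hcnt]
            by_cases hLpos : 0 < L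
            · have hjs : ∀ jx ∈ PySem.List.pyRange i (i - L) (-1),
                  0 ≤ jx ∧ jx < (visited.length : Int) ∧
                  PySem.List.pyGetD line jx 0 = PySem.List.pyGetD line i 0 ∧
                  PySem.List.pyGetD visited jx false = false := by
                intro jx hjx
                rw [PySem.List.mem_pyRange_neg_one] at hjx
                have h2 := hrun jx (by omega) (by omega)
                exact ⟨by omega, by rw [hlen]; omega, h2.1, h2.2⟩
              have hnd : (PySem.List.pyRange i (i - L) (-1)).Nodup := by
                rw [PySem.List.pyRange_neg_one_eq_reverse]
                simp [List.nodup_reverse, PySem.List.nodup_pyRange_one]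
              rw [pvUpLoop_ok line _ _ visited hjs hnd]
              have hbound : ∀ x ∈ PySem.List.pyRange i (i - L) (-1),
                  0 ≤ x ∧ x < (visited.length : Int) :=
                fun x hx => ⟨(hjs x hx).1, (hjs x hx).2.1⟩
              refine ih (i+1) 1 (pvMark visited (PySem.List.pyRange i (i - L) (-1))) (by omega)
                ⟨(pvMark_length _ _).trans hlen, by omega, by omega, by omega, by omega, ?_, ?_, ?_⟩
              · intro j hj
                rw [pvGetD_mark _ visited j hbound (by omega),
                  if_neg (fun hm => by rw [PySem.List.mem_pyRange_neg_one] at hm; omega)]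
                exact hright j (by omega)
              · intro j h1 h2
                have hji : j = i + 1 := by omega
                subst hji
                refine ⟨rfl, ?_⟩
                rw [pvGetD_mark _ visited _ hbound (by omega),
                  if_neg (fun hm => by rw [PySem.List.mem_pyRange_neg_one] at hm; omega)]
                exact hright _ (by omega)
              · intro hL h0 hEq
                have hx : i + 1 - 1 = i := by ring
                rw [hx] at hEq
                exact absurd hEq (by omega)
            · rw [PySem.List.pyRange_neg_one_eq_nil (by omega), upLoop]
              refine ih (i+1) 1 visited (by omega)
                ⟨hlen, by omega, by omega, by omega, by omega, ?_, ?_, ?_⟩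
              · intro j hj; exact hright j (by omega)
              · intro j h1 h2
                have hji : j = i + 1 := by omega
                subst hji
                exact ⟨rfl, hright _ (by omega)⟩
              · intro hL _ _; exact absurd hL hLpos
        · rw [if_neg hup]
          by_cases hdn : PySem.List.pyGetD line i 0 - 1 = PySem.List.pyGetD line (i+1) 0
          · rw [if_pos hdn,
              if_neg (show ¬(PySem.List.pyGetD line (i+1) 0 - PySem.List.pyGetD line i 0 = 0) by omega),
              if_neg (show ¬(PySem.List.pyGetD line (i+1) 0 - PySem.List.pyGetD line i 0 = 1) by omega),
              if_pos (show PySem.List.pyGetD line (i+1) 0 - PySem.List.pyGetD line i 0 = -1 by omega)]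
            by_cases hNle : (line.length : Int) ≤ i + L
            · rw [if_pos hNle]
              have hw : i + L ∈ PySem.List.pyRange (i+1) (i+1+L) 1 := by
                rw [PySem.List.mem_pyRange_one]; omega
              rw [pvDownLoop_fail line _ _ _ visited ⟨i + L, hw, Or.inl hNle⟩
                (fun x hx => by rw [PySem.List.mem_pyRange_one] at hx; omega)]
            · rw [if_neg hNle]
              push Not at hNle
              by_cases hany : (PySem.List.pyRange (i+2) (i+L+1) 1).any
                  (fun k => PySem.List.pyGetD line k 0 ≠ PySem.List.pyGetD line (i+1) 0) = true
              · rw [if_pos hany]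
                simp only [List.any_eq_true, decide_eq_true_eq] at hany
                obtain ⟨k, hkmem, hkne⟩ := hany
                rw [PySem.List.mem_pyRange_one] at hkmem
                have hw : k ∈ PySem.List.pyRange (i+1) (i+1+L) 1 := by
                  rw [PySem.List.mem_pyRange_one]; omega
                rw [pvDownLoop_fail line _ _ _ visited ⟨k, hw, Or.inr (Or.inl hkne)⟩
                  (fun x hx => by rw [PySem.List.mem_pyRange_one] at hx; omega)]
              · rw [if_neg hany]
                have hall : ∀ k, i + 2 ≤ k → k < i + L + 1 →
                    PySem.List.pyGetD line k 0 = PySem.List.pyGetD line (i+1) 0 := by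
                  intro k h1 h2
                  by_contra hne
                  exact hany (List.any_eq_true.mpr
                    ⟨k, by rw [PySem.List.mem_pyRange_one]; omega, by simpa using hne⟩)
                by_cases hLpos : 0 < L
                · have hjs : ∀ jx ∈ PySem.List.pyRange (i+1) (i+1+L) 1,
                      0 ≤ jx ∧ jx < (line.length : Int) ∧ jx < (visited.length : Int) ∧
                      PySem.List.pyGetD line jx 0 = PySem.List.pyGetD line (i+1) 0 ∧
                      PySem.List.pyGetD visited jx false = false := by
                    intro jx hjx
                    rw [PySem.List.mem_pyRange_one] at hjx
                    refine ⟨by omega, by omega, by rw [hlen]; omega, ?_, hright jx (by omega)⟩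
                    by_cases hx : jx = i + 1
                    · rw [hx]
                    · exact hall jx (by omega) (by omega)
                  rw [pvDownLoop_ok line _ _ _ visited hjs (PySem.List.nodup_pyRange_one _ _)]
                  have hskip : ∀ j ∈ PySem.List.pyRange (i+1) (i+L) 1,
                      PySem.List.pyGetD line j 0 = PySem.List.pyGetD line (j+1) 0 := by
                    intro j hj
                    rw [PySem.List.mem_pyRange_one] at hj
                    have hj1 : PySem.List.pyGetD line j 0 = PySem.List.pyGetD line (i+1) 0 := by
                      by_cases hx : j = i + 1
                      · rw [hx]
                      · exact hall j (by omega) (by omega)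
                    rw [hj1, hall (j+1) (by omega) (by omega)]
                  have hsplit := PySem.List.pyRange_one_append (i+1) (i+L) ((line.length : Int) - 1)
                    (by omega) (by omega)
                  rw [hsplit]
                  show canGo line L (line.length : Int)
                      (PySem.List.pyRange (i+1) (i+L) 1 ++ PySem.List.pyRange (i+L) ((line.length : Int) - 1) 1)
                      (pvMark visited (PySem.List.pyRange (i+1) (i+1+L) 1))
                    = altGo line L K (i + max 1 L) 0
                  rw [pvSkip_eq line L _ _ _ _ hskip]
                  rw [max_eq_right (show (1:Int) ≤ L by omega)]
                  have hbound : ∀ x ∈ PySem.List.pyRange (i+1) (i+1+L) 1,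
                      0 ≤ x ∧ x < (visited.length : Int) :=
                    fun x hx => ⟨(hjs x hx).1, (hjs x hx).2.2.1⟩
                  refine ih (i+L) 0 (pvMark visited (PySem.List.pyRange (i+1) (i+1+L) 1)) (by omega)
                    ⟨(pvMark_length _ _).trans hlen, by omega, by omega, by omega, by omega, ?_, ?_, ?_⟩
                  · intro j hj
                    rw [pvGetD_mark _ visited j hbound (by omega),
                      if_neg (fun hm => by rw [PySem.List.mem_pyRange_one] at hm; omega)]
                    exact hright j (by omega)
                  · intro j h1 h2; exact absurd h1 (by omega)
                  · intro hL h0 hEq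
                    have hx : i + L - 0 = i + L := by ring
                    rw [hx]
                    rw [pvGetD_mark _ visited _ hbound (by omega),
                      if_pos (by rw [PySem.List.mem_pyRange_one]; omega)]
                · rw [PySem.List.pyRange_one_eq_nil (show i+1+L ≤ i+1 by omega), downLoop]
                  rw [max_eq_left (show L ≤ (1:Int) by omega)]
                  refine ih (i+1) 0 visited (by omega)
                    ⟨hlen, by omega, by omega, by omega, by omega, ?_, ?_, ?_⟩
                  · intro j hj; exact hright j (by omega)
                  · intro j h1 h2; exact absurd h1 (by omega)
                  · intro hL _ _; exact absurd hL hLpos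
          · rw [if_neg hdn,
              if_neg (show ¬(PySem.List.pyGetD line (i+1) 0 - PySem.List.pyGetD line i 0 = 0) by omega),
              if_neg (show ¬(PySem.List.pyGetD line (i+1) 0 - PySem.List.pyGetD line i 0 = 1) by omega),
              if_neg (show ¬(PySem.List.pyGetD line (i+1) 0 - PySem.List.pyGetD line i 0 = -1) by omega)]

lemma pvCanPass_eq (line : List Int) (L : Int) : can_pass_A line L = can_pass_B line L := by
  unfold can_pass_A can_pass_B
  by_cases h0 : line.length = 0
  · have hnil : line = [] := List.eq_nil_of_length_eq_zero h0
    subst hnil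
    rfl
  · refine pvMain line L line.length 0 1 _ (by omega)
      ⟨?_, by omega, by omega, by omega, by omega, ?_, ?_, ?_⟩
    · simp
    · intro j hj; exact pvGetD_replicate _ j (by omega)
    · intro j h1 h2
      have hj : j = 0 := by omega
      subst hj
      exact ⟨rfl, pvGetD_replicate _ 0 (by omega)⟩
    · intro _ h0'
      omega

-- ===== VERDICT (by name: the statement is the Claim_ definition above) =====
theorem cnt_pass_spec : Claim_equal_cnt_pass := by
  intro grid L _
  unfold Spec_cnt_pass cnt_pass cnt_pass_alt
  have hrow : ∀ xs : List (List Int), xs.countP (fun r => can_pass_A r L) = xs.countP (fun r => can_pass_B r L) := by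
    intro xs
    exact List.countP_congr (fun r _ => by simp [pvCanPass_eq r L])
  simp only [PySem.List.foldl_count_if]
  rw [hrow grid, hrow (pyZipStar grid)]
  ring
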